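-- pv_equiv track=rewrite | github.com/murilofontes/healthcore | pages/02_upload_exam.py | _detect_columns
-- ===== SOURCE A (Python) =====
-- def _detect_columns(columns: list) -> dict:
--     """Tries to map flexible column names to our standard schema."""
--     mapping = {}
--     aliases = {
--         "marcador": ["marcador", "exame", "marker", "teste", "analito", "nome"],
--         "data": ["data", "date", "data_coleta", "data coleta", "data_exame"],
--         "valor": ["valor", "value", "resultado", "result"],
--         "referencia": ["referencia", "referência", "ref", "reference", "vr", "valor_ref"],
--         "unidade": ["unidade", "unit", "unid", "units"],
--         "contexto": ["contexto", "context", "obs", "observação", "observacao", "nota"],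
--     }
--     for field, candidates in aliases.items():
--         for col in columns:
--             if col in candidates or any(c in col for c in candidates):
--                 mapping[field] = col
--                 break
--     return mapping
-- ===== SOURCE B (Python) =====
-- def _detect_columns(columns: list) -> dict:
--     """Inverted-index pass: record each alias candidate's first matching column index,
--     then give each field the column at the minimal index among its candidates."""
--     aliases = {
--         "marcador": ["marcador", "exame", "marker", "teste", "analito", "nome"],
--         "data": ["data", "date", "data_coleta", "data coleta", "data_exame"],
--         "valor": ["valor", "value", "resultado", "result"],
--         "referencia": ["referencia", "referência", "ref", "reference", "vr", "valor_ref"],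
--         "unidade": ["unidade", "unit", "unid", "units"],
--         "contexto": ["contexto", "context", "obs", "observação", "observacao", "nota"],
--     }
--     all_candidates = [c for cands in aliases.values() for c in cands]
--     first_idx = {}
--     for i, col in enumerate(columns):
--         for c in all_candidates:
--             if c not in first_idx and c in col:
--                 first_idx[c] = i
--     mapping = {}
--     for field, candidates in aliases.items():
--         hits = [first_idx[c] for c in candidates if c in first_idx]
--         if hits:
--             mapping[field] = columns[min(hits)]
--     return mapping
-- ===== Notes on version B (the rewrite author's own statement) =====
-- stated objective: faster
-- what changed: Replaced the field-major scan-with-break by an inverted index: one pass over the columns records, per alias candidate, the index of the first column containing it (each candidate is tested only until its first hit); each field's column is then the one at the minimal recorded index among its candidates (correct because the first column matching any candidate is the column of minimal index at which some candidate occurs, and 'col in candidates' is subsumed by the substring test). The alias table itself is shared data, not shared logic.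
import Mathlib
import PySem

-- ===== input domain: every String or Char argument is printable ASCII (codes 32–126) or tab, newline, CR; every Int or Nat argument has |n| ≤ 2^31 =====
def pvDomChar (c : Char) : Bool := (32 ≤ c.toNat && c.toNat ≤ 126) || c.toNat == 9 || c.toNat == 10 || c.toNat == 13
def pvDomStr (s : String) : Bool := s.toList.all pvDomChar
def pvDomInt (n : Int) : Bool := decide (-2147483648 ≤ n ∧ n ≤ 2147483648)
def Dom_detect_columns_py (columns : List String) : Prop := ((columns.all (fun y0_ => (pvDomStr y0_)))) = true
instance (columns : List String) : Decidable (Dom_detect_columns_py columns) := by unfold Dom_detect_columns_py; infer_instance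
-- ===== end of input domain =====

-- B replaces A's field-major scan-with-break by an inverted index: one pass over the columns
-- records each candidate's first matching column index, and each field takes the column at the
-- minimal index among its candidates (objective: faster; measured faster in a timing run).

-- the aliases dict, shared by both programs
def pvAliases : List (String × List String) :=
  [("marcador", ["marcador", "exame", "marker", "teste", "analito", "nome"]),
   ("data", ["data", "date", "data_coleta", "data coleta", "data_exame"]),
   ("valor", ["valor", "value", "resultado", "result"]),
   ("referencia", ["referencia", "referência", "ref", "reference", "vr", "valor_ref"]),
   ("unidade", ["unidade", "unit", "unid", "units"]),
   ("contexto", ["contexto", "context", "obs", "observação", "observacao", "nota"])]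

-- ===== PORT A =====
-- A's match predicate: col in candidates or any(c in col for c in candidates)
def pvMatch (cands : List String) (col : String) : Bool :=
  cands.contains col || cands.any (fun c => PySem.Str.isIn c col)

-- A's inner loop: first column matching the candidates (break on first hit)
def pvFirstMatch (cands : List String) : List String → Option String
  | [] => none
  | col :: rest => if pvMatch cands col then some col else pvFirstMatch cands rest

def detect_columns_py (columns : List String) : List (String × String) :=
  (pvAliases.foldl (fun (m : PySem.Dict String String) fc =>
      match pvFirstMatch fc.2 columns with
      | some c => m.insert fc.1 c
      | none => m) PySem.Dict.empty).items

-- ===== PORT B =====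
-- all_candidates = [c for cands in aliases.values() for c in cands]
def pvAllCands : List String := pvAliases.flatMap (·.2)

-- first_idx: for each candidate, the index of the first column containing it
def pvFirstIdx (columns : List String) : PySem.Dict String Int :=
  (PySem.List.enumerate columns 0).foldl (fun m p =>
    pvAllCands.foldl (fun m' c =>
      if !m'.contains c && PySem.Str.isIn c p.2 then m'.insert c p.1 else m') m)
    PySem.Dict.empty

def detect_columns_py_alt (columns : List String) : List (String × String) :=
  (pvAliases.foldl (fun (m : PySem.Dict String String) fc =>
      match PySem.List.min? (fc.2.filterMap (fun c => (pvFirstIdx columns).get? c)) (fun x => x) with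
      | some i =>
        match PySem.List.pyGet? columns i with
        | some col => m.insert fc.1 col
        | none => m          -- unreachable guard: every stored index is in range
      | none => m) PySem.Dict.empty).items

-- ===== PRECONDITION & SPEC =====
def Spec_detect_columns_py (columns : List String) (out : List (String × String)) : Prop := out = detect_columns_py_alt columns
instance (columns : List String) (out : List (String × String)) : Decidable (Spec_detect_columns_py columns out) := by unfold Spec_detect_columns_py; infer_instance

-- ===== CLAIM (what is proved, stated in full; the proofs are below) =====
def Claim_equal_detect_columns_py : Prop := ∀ (columns : List String), Dom_detect_columns_py columns → Spec_detect_columns_py columns (detect_columns_py columns)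

-- ===== LEMMAS AND PROOFS =====

-- proof-side spec of first_idx: first index (from 0) of a column containing c
def pvIdx1 (c : String) : List String → Option Int
  | [] => none
  | col :: rest => if PySem.Str.isIn c col then some 0 else (pvIdx1 c rest).map (· + 1)

-- 'col in candidates' is subsumed by the substring disjunct (col contains itself)
lemma pv_match_eq_any (cands : List String) (col : String) :
    pvMatch cands col = cands.any (fun c => PySem.Str.isIn c col) := by
  unfold pvMatch
  cases hc : cands.contains col with
  | false => simp
  | true =>
    have hm : col ∈ cands := by simpa using hc
    have h2 : cands.any (fun c => PySem.Str.isIn c col) = true := by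
      refine List.any_eq_true.mpr ⟨col, hm, ?_⟩
      show PySem.Chars.isIn col.toList col.toList = true
      exact (PySem.Chars.isIn_iff_infix _ _).mpr (List.infix_refl _)
    rw [h2]
    rfl

lemma pv_idx1_nonneg (c : String) (cols : List String) (i : Int)
    (h : pvIdx1 c cols = some i) : 0 ≤ i := by
  induction cols generalizing i with
  | nil => simp [pvIdx1] at h
  | cons col rest ih =>
    unfold pvIdx1 at h
    split at h
    · cases h; omega
    · cases hr : pvIdx1 c rest with
      | none => rw [hr] at h; simp at h
      | some j => rw [hr] at h; simp at h; have := ih j hr; omega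

-- a fold over keys avoiding c does not change get? c
lemma pv_get?_fold_not_mem (ks : List String) (p : String → Bool) (v : Int)
    (m : PySem.Dict String Int) (c : String) (hf : c ∉ ks) :
    (ks.foldl (fun m' k => if !m'.contains k && p k then m'.insert k v else m') m).get? c
    = m.get? c := by
  induction ks generalizing m with
  | nil => rfl
  | cons k rest ih =>
    simp only [List.mem_cons, not_or] at hf
    simp only [List.foldl_cons]
    rw [ih _ hf.2]
    split
    · exact PySem.Dict.get?_insert_of_ne _ _ hf.1
    · rfl

-- the inner candidate pass (nodup keys): effect on the entry c
lemma pv_inner_get? (ks : List String) (p : String → Bool) (v : Int)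
    (m : PySem.Dict String Int) (c : String) (hmem : c ∈ ks) (hnd : ks.Nodup) :
    (ks.foldl (fun m' k => if !m'.contains k && p k then m'.insert k v else m') m).get? c
    = if !m.contains c && p c then some v else m.get? c := by
  induction ks generalizing m with
  | nil => cases hmem
  | cons k rest ih =>
    simp only [List.nodup_cons] at hnd
    rcases List.mem_cons.mp hmem with heq | hrest
    · subst heq
      simp only [List.foldl_cons]
      rw [pv_get?_fold_not_mem rest p v _ c hnd.1]
      by_cases h : (!m.contains c && p c) = true
      · simp [h, PySem.Dict.get?_insert_self]
      · simp [h]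
    · have hne : k ≠ c := fun h => hnd.1 (h ▸ hrest)
      simp only [List.foldl_cons]
      rw [ih _ hrest hnd.2]
      have hc : (if !m.contains k && p k then m.insert k v else m).contains c
          = m.contains c := by
        split
        · rw [PySem.Dict.contains_insert]
          have : (c == k) = false := beq_eq_false_iff_ne.mpr (Ne.symm hne)
          simp [this]
        · rfl
      have hg : (if !m.contains k && p k then m.insert k v else m).get? c = m.get? c := by
        split
        · exact PySem.Dict.get?_insert_of_ne _ _ (Ne.symm hne)
        · rfl
      rw [hc, hg]

-- the whole enumerate pass: get? c is m's value, else the first-match index shifted by s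
lemma pv_firstIdx_get?_aux (cols : List String) (s : Int) (m : PySem.Dict String Int)
    (c : String) (hmem : c ∈ pvAllCands) :
    ((PySem.List.enumerate cols s).foldl (fun m p =>
        pvAllCands.foldl (fun m' k =>
          if !m'.contains k && PySem.Str.isIn k p.2 then m'.insert k p.1 else m') m) m).get? c
    = (m.get? c).or ((pvIdx1 c cols).map (· + s)) := by
  induction cols generalizing s m with
  | nil => simp [PySem.List.enumerate_nil, pvIdx1]
  | cons col rest ih =>
    rw [PySem.List.enumerate_cons]
    simp only [List.foldl_cons]
    rw [ih (s + 1)]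
    have hnd : pvAllCands.Nodup := by decide
    rw [pv_inner_get? pvAllCands (fun k => PySem.Str.isIn k col) s m c hmem hnd]
    cases hm : m.get? c with
    | some v =>
      have hc : m.contains c = true := by
        rw [PySem.Dict.contains_eq_isSome_get?, hm]; rfl
      simp [hc]
    | none =>
      have hc : m.contains c = false := by
        rw [PySem.Dict.contains_eq_isSome_get?, hm]; rfl
      simp only [hc, Bool.not_false, Bool.true_and]
      by_cases hii : PySem.Str.isIn c col = true
      · have hiiC : PySem.Chars.isIn c.toList col.toList = true := by simpa using hii
        simp [pvIdx1, hiiC, Option.or]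
      · have hiiC : PySem.Chars.isIn c.toList col.toList = false := by simpa using hii
        cases hr : pvIdx1 c rest with
        | none => simp [pvIdx1, hiiC, hr, Option.or]
        | some j =>
          simp [pvIdx1, hiiC, hr, Option.or]
          omega

lemma pv_firstIdx_get? (columns : List String) (c : String) (hmem : c ∈ pvAllCands) :
    (pvFirstIdx columns).get? c = pvIdx1 c columns := by
  unfold pvFirstIdx
  rw [pv_firstIdx_get?_aux columns 0 PySem.Dict.empty c hmem]
  have : (PySem.Dict.empty : PySem.Dict String Int).get? c = none := rfl
  rw [this]
  cases pvIdx1 c columns <;> simp [Option.or]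

-- min over a (+1)-shifted Int list
lemma pv_foldl_min_add_one (t : List Int) (x : Int) :
    (t.map (· + 1)).foldl min (x + 1) = t.foldl min x + 1 := by
  induction t generalizing x with
  | nil => rfl
  | cons y ys ih =>
    simp only [List.map_cons, List.foldl_cons]
    rw [min_add_add_right, ih]

lemma pv_min?_map_add_one (l : List Int) :
    PySem.List.min? (l.map (· + 1)) (fun x => x) = (PySem.List.min? l (fun x => x)).map (· + 1) := by
  cases l with
  | nil => rfl
  | cons x t =>
    simp only [List.map_cons]
    rw [PySem.List.min?_id_cons, PySem.List.min?_id_cons]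
    simp [pv_foldl_min_add_one]

-- central lemma: A's first matching column is the column at the minimal candidate index
lemma pv_first_eq_min (cands : List String) (cols : List String) :
    pvFirstMatch cands cols
    = (PySem.List.min? (cands.filterMap (fun c => pvIdx1 c cols)) (fun x => x)).bind
        (fun i => PySem.List.pyGet? cols i) := by
  induction cols with
  | nil =>
    have : cands.filterMap (fun c => pvIdx1 c ([] : List String)) = [] := by
      simp [pvIdx1]
    simp [pvFirstMatch, this, PySem.List.min?]
  | cons col rest ih =>
    unfold pvFirstMatch
    rw [pv_match_eq_any]
    by_cases hany : cands.any (fun c => PySem.Str.isIn c col) = true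
    · -- some candidate occurs in col: the minimum index is 0
      rw [if_pos hany]
      obtain ⟨c, hc, hin⟩ := List.any_eq_true.mp hany
      have h0mem : (0 : Int) ∈ cands.filterMap (fun c => pvIdx1 c (col :: rest)) := by
        refine List.mem_filterMap.mpr ⟨c, hc, ?_⟩
        have hinC : PySem.Chars.isIn c.toList col.toList = true := by simpa using hin
        simp [pvIdx1, hinC]
      have hnonneg : ∀ i ∈ cands.filterMap (fun c => pvIdx1 c (col :: rest)), (0:Int) ≤ i := by
        intro i hi
        obtain ⟨c', _, hc'⟩ := List.mem_filterMap.mp hi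
        exact pv_idx1_nonneg c' _ i hc'
      cases hmin : PySem.List.min? (cands.filterMap (fun c => pvIdx1 c (col :: rest))) (fun x => x) with
      | none =>
        rw [PySem.List.min?_eq_none_iff] at hmin
        rw [hmin] at h0mem; cases h0mem
      | some i =>
        have hle : i ≤ 0 := PySem.List.min?_isMin hmin 0 h0mem
        have hge : 0 ≤ i := hnonneg i (PySem.List.min?_mem hmin)
        have : i = 0 := le_antisymm hle hge
        subst this
        simp
    · -- no candidate occurs in col: shift everything by one
      rw [if_neg hany]
      have hnone : ∀ c ∈ cands, PySem.Str.isIn c col = false := by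
        intro c hc
        have := List.any_eq_false.mp (Bool.not_eq_true _ ▸ hany)
        simpa using this c hc
      have hfm : cands.filterMap (fun c => pvIdx1 c (col :: rest))
          = (cands.filterMap (fun c => pvIdx1 c rest)).map (· + 1) := by
        rw [List.map_filterMap]
        refine List.filterMap_congr ?_
        intro c hc
        have hnC : PySem.Chars.isIn c.toList col.toList = false := by simpa using hnone c hc
        simp [pvIdx1, hnC]
      rw [hfm, pv_min?_map_add_one, ih]
      cases hmin : PySem.List.min? (cands.filterMap (fun c => pvIdx1 c rest)) (fun x => x) with
      | none => rfl
      | some i =>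
        have hge : 0 ≤ i := by
          obtain ⟨c', _, hc'⟩ := List.mem_filterMap.mp (PySem.List.min?_mem hmin)
          exact pv_idx1_nonneg c' _ i hc'
        simp only [Option.map_some, Option.bind_some]
        rw [PySem.List.pyGet?_of_nonneg _ (show (0:Int) ≤ i + 1 by omega),
          PySem.List.pyGet?_of_nonneg _ hge]
        have : (i + 1).toNat = i.toNat + 1 := by omega
        rw [this]
        simp

-- a fold over fresh distinct keys appends exactly the produced pairs
lemma pv_items_fold (g : String × List String → Option String) (al : List (String × List String))
    (d : PySem.Dict String String) (hnd : (d.keys ++ al.map (·.1)).Nodup) :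
    (al.foldl (fun (m : PySem.Dict String String) fc =>
      match g fc with
      | some c => m.insert fc.1 c
      | none => m) d).items
    = d.items ++ al.filterMap (fun fc => (g fc).map (fun c => (fc.1, c))) := by
  induction al generalizing d with
  | nil => simp
  | cons fc rest ih =>
    have hfk : fc.1 ∉ d.keys := by
      intro h
      exact (List.disjoint_of_nodup_append hnd) h (by simp)
    have hcont : d.contains fc.1 = false := by
      rw [PySem.Dict.contains_eq_decide_mem_keys]
      simp [hfk]
    simp only [List.foldl_cons]
    cases hfm : g fc with
    | none =>
      rw [ih d (by
        refine List.Nodup.sublist ?_ hnd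
        exact List.Sublist.append_left (List.sublist_cons_self _ _) _)]
      simp [hfm]
    | some c =>
      rw [ih (d.insert fc.1 c) (by
        rw [PySem.Dict.keys_insert_of_not_contains _ _ hcont]
        simpa using hnd)]
      rw [PySem.Dict.items_insert_of_not_contains _ _ hcont]
      simp [hfm]

-- B's step function, rewritten through Option.bind
lemma pv_B_step_eq (columns : List String) :
    (fun (m : PySem.Dict String String) (fc : String × List String) =>
      match PySem.List.min? (fc.2.filterMap (fun c => (pvFirstIdx columns).get? c)) (fun x => x) with
      | some i =>
        match PySem.List.pyGet? columns i with
        | some col => m.insert fc.1 col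
        | none => m
      | none => m)
    = (fun (m : PySem.Dict String String) fc =>
      match (PySem.List.min? (fc.2.filterMap (fun c => (pvFirstIdx columns).get? c)) (fun x => x)).bind
          (fun i => PySem.List.pyGet? columns i) with
      | some c => m.insert fc.1 c
      | none => m) := by
  funext m fc
  cases hmin : PySem.List.min? (fc.2.filterMap (fun c => (pvFirstIdx columns).get? c)) (fun x => x) with
  | none => rfl
  | some i =>
    cases PySem.List.pyGet? columns i <;> rfl

-- ===== VERDICT (by name: the statement is the Claim_ definition above) =====
theorem detect_columns_py_spec : Claim_equal_detect_columns_py := by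
  intro columns _
  unfold Spec_detect_columns_py detect_columns_py detect_columns_py_alt
  rw [pv_B_step_eq columns]
  rw [pv_items_fold (fun fc => pvFirstMatch fc.2 columns) pvAliases PySem.Dict.empty (by decide)]
  rw [pv_items_fold (fun fc =>
        (PySem.List.min? (fc.2.filterMap (fun c => (pvFirstIdx columns).get? c)) (fun x => x)).bind
          (fun i => PySem.List.pyGet? columns i)) pvAliases PySem.Dict.empty (by decide)]
  refine congrArg (_ ++ ·) (List.filterMap_congr ?_)
  intro fc hfc
  have hsub : ∀ c ∈ fc.2, c ∈ pvAllCands := by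
    intro c hc
    exact List.mem_flatMap.mpr ⟨fc, hfc, hc⟩
  have hfil : fc.2.filterMap (fun c => (pvFirstIdx columns).get? c)
      = fc.2.filterMap (fun c => pvIdx1 c columns) := by
    refine List.filterMap_congr ?_
    intro c hc
    exact pv_firstIdx_get? columns c (hsub c hc)
  rw [hfil, ← pv_first_eq_min]
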